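-- pv_equiv track=rewrite | github.com/haonly/TIL | Algorithm/여러가지문제/2019LINE_Intern.py | solution
-- ===== SOURCE A (Python) =====
-- from collections import deque
--
-- def solution(conyPosition, brownPosition):
--     time = 0
--     visit = [[0]*2 for _ in range(200001)]
--     q = deque()
--     q.append((brownPosition, 0))
--
--     while 1:
--         conyPosition += time
--         if conyPosition > 200000 or conyPosition < 0:
--             return -1
--         if visit[conyPosition][time%2]:
--             return time
--         for i in range(0, len(q)):
--             current = q.popleft()
--             currentPosition = current[0]
--             newTime = (current[1]+1)%2
--
--             newPosition = currentPosition - 1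
--             if newPosition >= 0 and not visit[newPosition][newTime]:
--                 visit[newPosition][newTime] = True
--                 q.append((newPosition, newTime))
--             newPosition  = currentPosition + 1
--             if newPosition < 200001 and not visit[newPosition][newTime]:
--                 visit[newPosition][newTime] = True
--                 q.append((newPosition, newTime))
--             newPosition = currentPosition * 2
--             if newPosition < 200001 and not visit[newPosition][newTime]:
--                 visit[newPosition][newTime] = True
--                 q.append((newPosition, newTime))
--         time += 1
-- ===== SOURCE B (Python) =====
-- def solution(conyPosition, brownPosition):
--     LIMIT = 200000
--     # Phase 1: full BFS over Brown's (position, parity) states; dist[2*p + par] is the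
--     # fewest moves d >= 1 after which Brown stands on p with d % 2 == par (-1 = never).
--     dist = [-1] * (2 * (LIMIT + 1))
--     frontier = [brownPosition]
--     depth = 0
--     while frontier:
--         nxt = []
--         par = (depth + 1) % 2
--         for p in frontier:
--             for np in (p - 1, p + 1, 2 * p):
--                 if 0 <= np <= LIMIT and dist[2 * np + par] == -1:
--                     dist[2 * np + par] = depth + 1
--                     nxt.append(np)
--         frontier = nxt
--         depth += 1
--     # Phase 2: scan the ticks; Cony moves t steps at tick t, Brown catches her at the
--     # first tick t whose position/parity Brown can already have reached within t moves.
--     t = 0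
--     while True:
--         conyPosition += t
--         if conyPosition > LIMIT or conyPosition < 0:
--             return -1
--         d = dist[2 * conyPosition + t % 2]
--         if d != -1 and d <= t:
--             return t
--         t += 1
-- ===== Notes on version B (the rewrite author's own statement) =====
-- stated objective: alternative
-- what changed: A runs one BFS wave per simulated tick, fused with Cony's movement inside a single while-loop over a deque of (position,parity) pairs and a 200001x2 visit matrix; …
-- outside the precondition, e.g. on solution(199999, -2): A returns 1, B returns -1; on solution(100, 200002): A raises IndexError, B returns -1; on solution(0, -7): A raises IndexError, B returns -1
import Mathlib
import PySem

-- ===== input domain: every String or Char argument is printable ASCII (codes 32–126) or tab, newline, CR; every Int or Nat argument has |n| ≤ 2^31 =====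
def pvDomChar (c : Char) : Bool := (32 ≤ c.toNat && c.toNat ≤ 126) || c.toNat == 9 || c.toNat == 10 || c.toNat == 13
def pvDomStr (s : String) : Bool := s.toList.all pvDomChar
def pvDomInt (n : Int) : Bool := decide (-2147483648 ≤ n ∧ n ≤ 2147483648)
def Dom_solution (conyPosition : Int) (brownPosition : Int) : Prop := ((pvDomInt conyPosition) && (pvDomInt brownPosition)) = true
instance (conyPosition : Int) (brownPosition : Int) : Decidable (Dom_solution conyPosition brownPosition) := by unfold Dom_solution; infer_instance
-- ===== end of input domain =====

-- B replaces A's fused per-tick lockstep (one BFS wave per simulated tick) by an exhaustive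
-- BFS filling a flat arrival-time table followed by an independent arithmetic scan over ticks
-- (objective: alternative decomposition; a timing run measured B faster on large inputs).

-- ===== PORT A =====
-- visit[p][par] is stored flat at index 2*p+par in an Array Bool of size 400002.
-- The deque: 'for i in range(0, len(q))' pops exactly the len(q) items present at round
-- start, and this round's appends are never popped within the round; so the round state
-- carries (front = items left to pop, back = items appended so far, consed and reversed at
-- round end) — exact for a deque used in this pattern.
def solAStep (st : Array Bool × List (Int × Int) × List (Int × Int)) :
    Array Bool × List (Int × Int) × List (Int × Int) :=
  match st with
  | (visit, [], back) => (visit, [], back)  -- unreachable: the loop pops exactly len(q) items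
  | (visit, current :: front, back) =>
    let currentPosition := current.1
    let newTime := PySem.Int.mod (current.2 + 1) 2
    let np1 := currentPosition - 1
    let vb1 :=
      if np1 ≥ 0 ∧ visit.getD (2 * np1 + newTime).toNat false = false then
        (visit.setIfInBounds (2 * np1 + newTime).toNat true, (np1, newTime) :: back)
      else (visit, back)
    let np2 := currentPosition + 1
    let vb2 :=
      if np2 < 200001 ∧ vb1.1.getD (2 * np2 + newTime).toNat false = false then
        (vb1.1.setIfInBounds (2 * np2 + newTime).toNat true, (np2, newTime) :: vb1.2)
      else vb1
    let np3 := currentPosition * 2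
    let vb3 :=
      if np3 < 200001 ∧ vb2.1.getD (2 * np3 + newTime).toNat false = false then
        (vb2.1.setIfInBounds (2 * np3 + newTime).toNat true, (np3, newTime) :: vb2.2)
      else vb2
    (vb3.1, front, vb3.2)

-- the inner 'for i in range(0, len(q))' loop of A
def solARound (visit : Array Bool) (q : List (Int × Int)) : Array Bool × List (Int × Int) :=
  let res := (PySem.List.pyRange 0 (PySem.List.len q) 1).foldl (fun st _ => solAStep st) (visit, q, [])
  (res.1, res.2.1 ++ res.2.2.reverse)

-- the 'while 1' loop of A (fuel bounds the tick count; 100000 ticks always suffice on Dom,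
-- since conyPosition + t*(t+1)/2 exceeds 200000 by t = 65544 for conyPosition ≥ -2^31)
def solALoop : Nat → Int → Int → Array Bool → List (Int × Int) → Int
  | 0, _, _, _, _ => -1
  | fuel + 1, conyPosition, time, visit, q =>
    let conyPosition := conyPosition + time
    if conyPosition > 200000 ∨ conyPosition < 0 then -1
    else if visit.getD (2 * conyPosition + PySem.Int.mod time 2).toNat false then time
    else
      let r := solARound visit q
      solALoop fuel conyPosition (time + 1) r.1 r.2

def solution (conyPosition : Int) (brownPosition : Int) : Int :=
  solALoop 100000 conyPosition 0 (Array.replicate 400002 false) [(brownPosition, 0)]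

-- ===== PORT B =====
-- dist[2*p+par] = fewest moves d ≥ 1 after which Brown stands on p with d % 2 = par, -1 if never.
def solBExpand (dist : Array Int) (frontier : List Int) (depth : Int) : Array Int × List Int :=
  let par := PySem.Int.mod (depth + 1) 2
  let res := frontier.foldl (fun (st : Array Int × List Int) p =>
    [p - 1, p + 1, 2 * p].foldl (fun (st : Array Int × List Int) np =>
      if 0 ≤ np ∧ np ≤ 200000 ∧ st.1.getD (2 * np + par).toNat (-1) = -1 then
        (st.1.setIfInBounds (2 * np + par).toNat (depth + 1), np :: st.2)
      else st) st) (dist, [])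
  (res.1, res.2.reverse)

-- the 'while frontier' loop of B (fuel bounds the round count; at most 200004 rounds ever run)
def solBBfs : Nat → Array Int → List Int → Int → Array Int
  | 0, dist, _, _ => dist
  | fuel + 1, dist, frontier, depth =>
    if frontier = [] then dist
    else
      let r := solBExpand dist frontier depth
      solBBfs fuel r.1 r.2 (depth + 1)

-- the 'while True' scan of B (same tick fuel as A's port)
def solBScan : Nat → Array Int → Int → Int → Int
  | 0, _, _, _ => -1
  | fuel + 1, dist, conyPosition, t =>
    let conyPosition := conyPosition + t
    if conyPosition > 200000 ∨ conyPosition < 0 then -1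
    else
      let d := dist.getD (2 * conyPosition + PySem.Int.mod t 2).toNat (-1)
      if d ≠ -1 ∧ d ≤ t then t
      else solBScan fuel dist conyPosition (t + 1)

def solution_alt (conyPosition : Int) (brownPosition : Int) : Int :=
  let dist := solBBfs 500000 (Array.replicate 400002 (-1)) [brownPosition] 0
  solBScan 100000 dist conyPosition 0

-- ===== PRECONDITION & SPEC =====
-- Pre_ excludes the inputs on which A's BFS indexes its 200001-row visit list out of range
-- (brownPosition outside [0, 200001]): there A either raises IndexError (stepping or doubling
-- past the list bounds) or, before crashing, returns a value produced by Python negative-index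
-- wraparound into unrelated visit rows — except when conyPosition > 200000, where A returns -1
-- before touching the BFS (those inputs are kept).
def Pre_solution (conyPosition : Int) (brownPosition : Int) : Prop :=
  (0 ≤ brownPosition ∧ brownPosition ≤ 200001) ∨ 200000 < conyPosition
instance (conyPosition : Int) (brownPosition : Int) : Decidable (Pre_solution conyPosition brownPosition) := by
  unfold Pre_solution; infer_instance

def pvWitness_solution : Int × Int := (3, 5)

def Spec_solution (conyPosition : Int) (brownPosition : Int) (out : Int) : Prop :=
  out = solution_alt conyPosition brownPosition
instance (conyPosition : Int) (brownPosition : Int) (out : Int) : Decidable (Spec_solution conyPosition brownPosition out) := by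
  unfold Spec_solution; infer_instance

-- ===== CLAIM (what is proved, stated in full; the proofs are below) =====
def Claim_equal_solution : Prop := ∀ (conyPosition : Int) (brownPosition : Int), Dom_solution conyPosition brownPosition → Pre_solution conyPosition brownPosition → Spec_solution conyPosition brownPosition (solution conyPosition brownPosition)

-- ===== LEMMAS AND PROOFS =====

-- Proof-side views of the two programs' states, round by round.

def stateA (brown : Int) : Nat → Array Bool × List (Int × Int)
  | 0 => (Array.replicate 400002 false, [(brown, 0)])
  | r + 1 => solARound (stateA brown r).1 (stateA brown r).2

def roundB (st : Array Int × List Int × Int) : Array Int × List Int × Int :=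
  let e := solBExpand st.1 st.2.1 st.2.2
  (e.1, e.2, st.2.2 + 1)

def stateB (brown : Int) : Nat → Array Int × List Int × Int
  | 0 => (Array.replicate 400002 (-1), [brown], 0)
  | r + 1 => roundB (stateB brown r)

-- pointwise correspondence of A's visit array with B's distance table
def Corr (v : Array Bool) (d : Array Int) : Prop :=
  v.size = 400002 ∧ d.size = 400002 ∧
    ∀ i : Nat, v.getD i false = decide (d.getD i (-1) ≠ -1)

-- the full per-round invariant
def InvAt (brown : Int) (r : Nat) : Prop :=
  (stateB brown r).2.2 = (r : Int) ∧
  (stateA brown r).2 = (stateB brown r).2.1.map (fun p => (p, (r : Int) % 2)) ∧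
  (∀ p ∈ (stateB brown r).2.1, 0 ≤ p ∧ p ≤ 200001) ∧
  Corr (stateA brown r).1 (stateB brown r).1 ∧
  (∀ i : Nat, (stateB brown r).1.getD i (-1) = -1 ∨
      (1 ≤ (stateB brown r).1.getD i (-1) ∧ (stateB brown r).1.getD i (-1) ≤ (r : Int)))

-- generic array-access helpers
lemma getD_setIB {α : Type} (a : Array α) (i j : Nat) (x d : α) :
    (a.setIfInBounds i x).getD j d = if j = i ∧ i < a.size then x else a.getD j d := by
  simp [Array.getD_eq_getD_getElem?, Array.getElem?_setIfInBounds]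
  split_ifs <;> simp_all

lemma getD_repl {α : Type} (n : Nat) (x : α) (i : Nat) (d : α) :
    (Array.replicate n x).getD i d = if i < n then x else d := by
  simp [Array.getD_eq_getD_getElem?, Array.getElem?_replicate]
  split_ifs <;> simp_all

lemma parity_step (r : Int) : PySem.Int.mod (r % 2 + 1) 2 = (r + 1) % 2 := by
  rw [PySem.Int.mod_eq_emod_of_pos (by omega)]; omega

lemma mod_two_cast (r : Int) : PySem.Int.mod r 2 = r % 2 := by
  rw [PySem.Int.mod_eq_emod_of_pos (by omega)]

-- proof-side views of the per-element updates of the two round loops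
def bstep (r : Nat) (st : Array Int × List Int) (np : Int) : Array Int × List Int :=
  if 0 ≤ np ∧ np ≤ 200000 ∧ st.1.getD (2 * np + ((r : Int) + 1) % 2).toNat (-1) = -1 then
    (st.1.setIfInBounds (2 * np + ((r : Int) + 1) % 2).toNat ((r : Int) + 1), np :: st.2)
  else st

def belem (r : Nat) (st : Array Int × List Int) (p : Int) : Array Int × List Int :=
  bstep r (bstep r (bstep r st (p - 1)) (p + 1)) (2 * p)

def amove1 (r : Nat) (st : Array Bool × List (Int × Int)) (np : Int) : Array Bool × List (Int × Int) :=
  if np ≥ 0 ∧ st.1.getD (2 * np + ((r : Int) + 1) % 2).toNat false = false then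
    (st.1.setIfInBounds (2 * np + ((r : Int) + 1) % 2).toNat true, (np, ((r : Int) + 1) % 2) :: st.2)
  else st

def amove2 (r : Nat) (st : Array Bool × List (Int × Int)) (np : Int) : Array Bool × List (Int × Int) :=
  if np < 200001 ∧ st.1.getD (2 * np + ((r : Int) + 1) % 2).toNat false = false then
    (st.1.setIfInBounds (2 * np + ((r : Int) + 1) % 2).toNat true, (np, ((r : Int) + 1) % 2) :: st.2)
  else st

def aelem (r : Nat) (st : Array Bool × List (Int × Int)) (p : Int) : Array Bool × List (Int × Int) :=
  amove2 r (amove2 r (amove1 r st (p - 1)) (p + 1)) (p * 2)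

lemma solBExpand_eq (r : Nat) (d : Array Int) (f : List Int) :
    solBExpand d f (r : Int) =
      ((f.foldl (belem r) (d, [])).1, (f.foldl (belem r) (d, [])).2.reverse) := by
  simp only [solBExpand, mod_two_cast]
  rfl

lemma solAStep_cons (r : Nat) (v : Array Bool) (front : List (Int × Int))
    (back : List (Int × Int)) (p : Int) :
    solAStep (v, (p, (r : Int) % 2) :: front, back) =
      ((aelem r (v, back) p).1, front, (aelem r (v, back) p).2) := by
  simp only [solAStep, aelem, amove1, amove2, parity_step]

-- mid-round correspondence between A's (visit, appended) and B's (dist, appended)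
def Mid (r : Nat) (d0 : Array Int) (a : Array Bool × List (Int × Int))
    (b : Array Int × List Int) : Prop :=
  Corr a.1 b.1 ∧
  a.2 = b.2.map (fun p => (p, ((r : Int) + 1) % 2)) ∧
  (∀ p ∈ b.2, 0 ≤ p ∧ p ≤ 200000) ∧
  (∀ i : Nat, b.1.getD i (-1) = d0.getD i (-1) ∨
      (d0.getD i (-1) = -1 ∧ b.1.getD i (-1) = (r : Int) + 1))

lemma mid_update (r : Nat) (d0 : Array Int) (a : Array Bool × List (Int × Int))
    (b : Array Int × List Int) (np : Int) (hM : Mid r d0 a b)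
    (h1 : 0 ≤ np) (h2 : np ≤ 200000)
    (hunset : b.1.getD (2 * np + ((r : Int) + 1) % 2).toNat (-1) = -1) :
    Mid r d0
      (a.1.setIfInBounds (2 * np + ((r : Int) + 1) % 2).toNat true, (np, ((r : Int) + 1) % 2) :: a.2)
      (b.1.setIfInBounds (2 * np + ((r : Int) + 1) % 2).toNat ((r : Int) + 1), np :: b.2) := by
  obtain ⟨⟨hsa, hsb, hpt⟩, hmap, hrange, hmono⟩ := hM
  set idx := (2 * np + ((r : Int) + 1) % 2).toNat with hidx
  refine ⟨⟨?_, ?_, ?_⟩, ?_, ?_, ?_⟩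
  · simpa [Array.size_setIfInBounds] using hsa
  · simpa [Array.size_setIfInBounds] using hsb
  · intro i
    rw [getD_setIB, getD_setIB, hsa, hsb]
    split_ifs with h
    · simp; omega
    · exact hpt i
  · simp [hmap]
  · intro p hp
    rcases List.mem_cons.mp hp with rfl | hp
    · exact ⟨h1, h2⟩
    · exact hrange p hp
  · intro i
    rw [getD_setIB, hsb]
    split_ifs with h
    · rcases hmono i with hm | hm
      · rw [h.1] at hm ⊢
        right
        exact ⟨by rw [← hm]; exact hunset, rfl⟩
      · rw [h.1] at hm ⊢
        right
        exact ⟨hm.1, rfl⟩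
    · exact hmono i

lemma amove1_corr (r : Nat) (d0 : Array Int) (a : Array Bool × List (Int × Int))
    (b : Array Int × List Int) (np : Int) (hM : Mid r d0 a b) (hnp : np ≤ 200000) :
    Mid r d0 (amove1 r a np) (bstep r b np) := by
  have hpt := hM.1.2.2 (2 * np + ((r : Int) + 1) % 2).toNat
  rw [amove1, bstep]
  by_cases hset : b.1.getD (2 * np + ((r : Int) + 1) % 2).toNat (-1) = -1
  · by_cases hge : 0 ≤ np
    · rw [if_pos ⟨hge, by rw [hpt, hset]; simp⟩, if_pos ⟨hge, hnp, hset⟩]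
      exact mid_update r d0 a b np hM hge hnp hset
    · rw [if_neg (fun h => hge h.1), if_neg (fun h => hge h.1)]
      exact hM
  · rw [if_neg (fun h => hset (not_not.mp (of_decide_eq_false (hpt ▸ h.2)))),
      if_neg (fun h => hset h.2.2)]
    exact hM

lemma amove2_corr (r : Nat) (d0 : Array Int) (a : Array Bool × List (Int × Int))
    (b : Array Int × List Int) (np : Int) (hM : Mid r d0 a b) (hnp : 0 ≤ np) :
    Mid r d0 (amove2 r a np) (bstep r b np) := by
  have hpt := hM.1.2.2 (2 * np + ((r : Int) + 1) % 2).toNat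
  rw [amove2, bstep]
  by_cases hset : b.1.getD (2 * np + ((r : Int) + 1) % 2).toNat (-1) = -1
  · by_cases hlt : np < 200001
    · rw [if_pos ⟨hlt, by rw [hpt, hset]; simp⟩, if_pos ⟨hnp, by omega, hset⟩]
      exact mid_update r d0 a b np hM hnp (by omega) hset
    · rw [if_neg (fun h => hlt h.1), if_neg (fun h => absurd h.2.1 (by omega))]
      exact hM
  · rw [if_neg (fun h => hset (not_not.mp (of_decide_eq_false (hpt ▸ h.2)))),
      if_neg (fun h => hset h.2.2)]
    exact hM

lemma elem_corr (r : Nat) (d0 : Array Int) (a : Array Bool × List (Int × Int))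
    (b : Array Int × List Int) (p : Int) (hp : 0 ≤ p ∧ p ≤ 200001) (hM : Mid r d0 a b) :
    Mid r d0 (aelem r a p) (belem r b p) := by
  rw [aelem, belem, show p * 2 = 2 * p from mul_comm p 2]
  have h1 := amove1_corr r d0 a b (p - 1) hM (by omega)
  have h2 := amove2_corr r d0 _ _ (p + 1) h1 (by omega)
  exact amove2_corr r d0 _ _ (2 * p) h2 (by omega)

lemma fold_corr (r : Nat) (d0 : Array Int) :
    ∀ (f : List Int) (a : Array Bool × List (Int × Int)) (b : Array Int × List Int),
      Mid r d0 a b → (∀ p ∈ f, 0 ≤ p ∧ p ≤ 200001) →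
      Mid r d0 (f.foldl (aelem r) a) (f.foldl (belem r) b) := by
  intro f
  induction f with
  | nil => intro a b hM _; exact hM
  | cons p f ih =>
    intro a b hM hr
    exact ih _ _ (elem_corr r d0 a b p ⟨(hr p (by simp)).1, (hr p (by simp)).2⟩ hM)
      (fun q hq => hr q (by simp [hq]))

lemma iterate_eq_fold (r : Nat) :
    ∀ (f : List Int) (v : Array Bool) (back : List (Int × Int)),
      solAStep^[f.length] (v, f.map (fun p => (p, (r : Int) % 2)), back) =
        ((f.foldl (aelem r) (v, back)).1, [], (f.foldl (aelem r) (v, back)).2) := by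
  intro f
  induction f with
  | nil => intro v back; simp
  | cons p f ih =>
    intro v back
    rw [List.length_cons, List.map_cons, Function.iterate_succ_apply, solAStep_cons,
      List.foldl_cons]
    exact ih (aelem r (v, back) p).1 (aelem r (v, back) p).2

lemma solARound_eq (r : Nat) (v : Array Bool) (f : List Int) :
    solARound v (f.map (fun p => (p, (r : Int) % 2))) =
      ((f.foldl (aelem r) (v, [])).1, (f.foldl (aelem r) (v, [])).2.reverse) := by
  rw [solARound, List.foldl_const, PySem.List.len_eq, List.length_map,
    PySem.List.length_pyRange_one]
  have : ((f.length : Int) - 0).toNat = f.length := by omega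
  rw [this, iterate_eq_fold]
  simp

lemma roundB_nil (d : Array Int) (dep : Int) : roundB (d, [], dep) = (d, [], dep + 1) := by
  simp [roundB, solBExpand]

lemma iter_nil : ∀ (n : Nat) (d : Array Int) (dep : Int),
    ∃ dep', roundB^[n] (d, [], dep) = (d, [], dep') := by
  intro n
  induction n with
  | zero => intro d dep; exact ⟨dep, rfl⟩
  | succ n ih =>
    intro d dep
    rw [Function.iterate_succ_apply, roundB_nil]
    exact ih d (dep + 1)

lemma solBBfs_eq_iter : ∀ (fuel : Nat) (d : Array Int) (f : List Int) (dep : Int),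
    solBBfs fuel d f dep = (roundB^[fuel] (d, f, dep)).1 := by
  intro fuel
  induction fuel with
  | zero => intro d f dep; rfl
  | succ n ih =>
    intro d f dep
    by_cases hf : f = []
    · subst hf
      rw [Function.iterate_succ_apply, roundB_nil]
      obtain ⟨dep', hd⟩ := iter_nil n d (dep + 1)
      simp [solBBfs, hd]
    · rw [Function.iterate_succ_apply]
      simp only [solBBfs, if_neg hf]
      exact ih _ _ _

lemma stateB_eq_iter (brown : Int) : ∀ r : Nat,
    stateB brown r = roundB^[r] (Array.replicate 400002 (-1), [brown], 0) := by
  intro r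
  induction r with
  | zero => rfl
  | succ r ih => rw [stateB, ih, Function.iterate_succ_apply']

lemma bfs_eq_stateB (brown : Int) :
    solBBfs 500000 (Array.replicate 400002 (-1)) [brown] 0 = (stateB brown 500000).1 := by
  rw [stateB_eq_iter, solBBfs_eq_iter]

lemma inv_step (brown : Int) (r : Nat) (hInv : InvAt brown r) :
    InvAt brown (r + 1) ∧
      (∀ i : Nat, (stateB brown (r + 1)).1.getD i (-1) = (stateB brown r).1.getD i (-1) ∨
        ((stateB brown r).1.getD i (-1) = -1 ∧
          (stateB brown (r + 1)).1.getD i (-1) = (r : Int) + 1)) := by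
  obtain ⟨hdep, hq, hrange, hcorr, hval⟩ := hInv
  have hcast : ((r + 1 : Nat) : Int) = (r : Int) + 1 := by push_cast; ring
  have hmid0 : Mid r (stateB brown r).1 ((stateA brown r).1, []) ((stateB brown r).1, []) :=
    ⟨hcorr, by simp, by simp, fun i => Or.inl rfl⟩
  have hF := fold_corr r (stateB brown r).1 (stateB brown r).2.1 _ _ hmid0 hrange
  have hstA : stateA brown (r + 1) =
      (((stateB brown r).2.1.foldl (aelem r) ((stateA brown r).1, [])).1,
       ((stateB brown r).2.1.foldl (aelem r) ((stateA brown r).1, [])).2.reverse) := by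
    show solARound (stateA brown r).1 (stateA brown r).2 = _
    rw [hq, solARound_eq]
  have hstB : stateB brown (r + 1) =
      (((stateB brown r).2.1.foldl (belem r) ((stateB brown r).1, [])).1,
       ((stateB brown r).2.1.foldl (belem r) ((stateB brown r).1, [])).2.reverse,
       (r : Int) + 1) := by
    show roundB (stateB brown r) = _
    rw [roundB]
    rw [hdep, solBExpand_eq]
  obtain ⟨hC, hmap, hrng, hmono⟩ := hF
  refine ⟨⟨?_, ?_, ?_, ?_, ?_⟩, ?_⟩
  · rw [hstB, hcast]
  · rw [hstA, hstB]
    simp only [hcast]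
    rw [hmap, List.map_reverse]
  · rw [hstB]
    intro p hp
    simp only [List.mem_reverse] at hp
    have := hrng p hp
    omega
  · rw [hstA, hstB]
    exact hC
  · rw [hstB]
    intro i
    simp only [hcast]
    rcases hmono i with hm | hm
    · rw [hm]
      rcases hval i with hv | hv
      · exact Or.inl hv
      · exact Or.inr ⟨hv.1, by omega⟩
    · exact Or.inr ⟨by omega, by rw [hm.2]⟩
  · rw [hstB]
    intro i
    exact hmono i

lemma invAt_all (brown : Int) (hb : 0 ≤ brown ∧ brown ≤ 200001) : ∀ r, InvAt brown r := by
  intro r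
  induction r with
  | zero =>
    refine ⟨rfl, by simp [stateA, stateB], by simpa [stateB] using hb, ⟨by simp [stateA], by simp [stateB], ?_⟩, ?_⟩
    · intro i
      show (Array.replicate 400002 false).getD i false =
        decide ((Array.replicate 400002 (-1 : Int)).getD i (-1) ≠ -1)
      rw [getD_repl, getD_repl]
      split_ifs <;> simp
    · intro i
      show (Array.replicate 400002 (-1 : Int)).getD i (-1) = -1 ∨ _
      rw [getD_repl]
      split_ifs <;> simp
  | succ r ih => exact (inv_step brown r ih).1

lemma stateB_mono (brown : Int) (hb : 0 ≤ brown ∧ brown ≤ 200001) (r : Nat) (i : Nat) :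
    (stateB brown (r + 1)).1.getD i (-1) = (stateB brown r).1.getD i (-1) ∨
      ((stateB brown r).1.getD i (-1) = -1 ∧ (stateB brown (r + 1)).1.getD i (-1) = (r : Int) + 1) :=
  (inv_step brown r (invAt_all brown hb r)).2 i

lemma stateB_persist (brown : Int) (hb : 0 ≤ brown ∧ brown ≤ 200001) :
    ∀ (s r : Nat), r ≤ s → ∀ i : Nat, (stateB brown r).1.getD i (-1) ≠ -1 →
      (stateB brown s).1.getD i (-1) = (stateB brown r).1.getD i (-1) := by
  intro s
  induction s with
  | zero =>
    intro r hr i h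
    have : r = 0 := by omega
    rw [this]
  | succ s ih =>
    intro r hr i h
    rcases Nat.eq_or_lt_of_le hr with he | hl
    · rw [he]
    · have hrs : r ≤ s := by omega
      have hs := ih r hrs i h
      rcases stateB_mono brown hb s i with hm | hm
      · rw [hm, hs]
      · exact absurd (hs ▸ hm.1) h

lemma trunc_aux (brown : Int) (hb : 0 ≤ brown ∧ brown ≤ 200001) :
    ∀ (k t : Nat) (i : Nat),
      (stateB brown (t + k)).1.getD i (-1) ≠ -1 →
      (stateB brown (t + k)).1.getD i (-1) ≤ (t : Int) →
      (stateB brown t).1.getD i (-1) ≠ -1 := by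
  intro k
  induction k with
  | zero => intro t i h _; simpa using h
  | succ k ih =>
    intro t i h hle
    have hN : t + (k + 1) = (t + 1) + k := by omega
    rw [hN] at h hle
    have h1 : (stateB brown (t + 1)).1.getD i (-1) ≠ -1 :=
      ih (t + 1) i h (le_trans hle (by push_cast; omega))
    rcases stateB_mono brown hb t i with hm | hm
    · rw [← hm]; exact h1
    · exfalso
      have hp := stateB_persist brown hb ((t + 1) + k) (t + 1) (by omega) i h1
      rw [hp, hm.2] at hle
      omega

lemma stateB_trunc (brown : Int) (hb : 0 ≤ brown ∧ brown ≤ 200001) (t : Nat)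
    (ht : t ≤ 500000) (i : Nat) :
    (stateB brown t).1.getD i (-1) ≠ -1 ↔
      ((stateB brown 500000).1.getD i (-1) ≠ -1 ∧
        (stateB brown 500000).1.getD i (-1) ≤ (t : Int)) := by
  constructor
  · intro h
    have hp := stateB_persist brown hb 500000 t ht i h
    refine ⟨by rw [hp]; exact h, ?_⟩
    rw [hp]
    rcases (invAt_all brown hb t).2.2.2.2 i with hv | hv
    · exact absurd hv h
    · exact hv.2
  · intro hc
    have hN : 500000 = t + (500000 - t) := by omega
    rw [hN] at hc
    exact trunc_aux brown hb (500000 - t) t i hc.1 hc.2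

lemma solALoop_out (fuel : Nat) (cony t : Int) (v : Array Bool) (q : List (Int × Int))
    (h : cony + t > 200000 ∨ cony + t < 0) : solALoop (fuel + 1) cony t v q = -1 := by
  simp only [solALoop]
  rw [if_pos h]

lemma solBScan_out (fuel : Nat) (d : Array Int) (cony t : Int)
    (h : cony + t > 200000 ∨ cony + t < 0) : solBScan (fuel + 1) d cony t = -1 := by
  simp only [solBScan]
  rw [if_pos h]

lemma loop_eq_scan (brown : Int) (hb : 0 ≤ brown ∧ brown ≤ 200001) :
    ∀ (fuel : Nat) (r : Nat) (cony : Int), r + fuel ≤ 500000 →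
      solALoop fuel cony (r : Int) (stateA brown r).1 (stateA brown r).2 =
        solBScan fuel (stateB brown 500000).1 cony (r : Int) := by
  intro fuel
  induction fuel with
  | zero => intro r cony _; rfl
  | succ fuel ih =>
    intro r cony hle
    simp only [solALoop, solBScan]
    by_cases hout : cony + (r : Int) > 200000 ∨ cony + (r : Int) < 0
    · rw [if_pos hout, if_pos hout]
    · rw [if_neg hout, if_neg hout]
      have hcorr := (invAt_all brown hb r).2.2.2.1
      have hpt := hcorr.2.2 (2 * (cony + (r : Int)) + PySem.Int.mod (r : Int) 2).toNat
      have htr := stateB_trunc brown hb r (by omega)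
        (2 * (cony + (r : Int)) + PySem.Int.mod (r : Int) 2).toNat
      by_cases hv : (stateA brown r).1.getD
          (2 * (cony + (r : Int)) + PySem.Int.mod (r : Int) 2).toNat false = true
      · have hne := htr.mp (by rw [hpt] at hv; exact of_decide_eq_true hv)
        rw [if_pos hv, if_pos ⟨hne.1, hne.2⟩]
      · have hnot : ¬ ((stateB brown 500000).1.getD
            (2 * (cony + (r : Int)) + PySem.Int.mod (r : Int) 2).toNat (-1) ≠ -1 ∧
            (stateB brown 500000).1.getD
            (2 * (cony + (r : Int)) + PySem.Int.mod (r : Int) 2).toNat (-1) ≤ (r : Int)) := by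
          intro hc
          have hx := htr.mpr hc
          simp only [Bool.not_eq_true] at hv
          rw [hpt] at hv
          exact hx (not_not.mp (of_decide_eq_false hv))
        rw [if_neg hv, if_neg hnot]
        have hih := ih (r + 1) (cony + (r : Int)) (by omega)
        have hcast : ((r + 1 : Nat) : Int) = (r : Int) + 1 := by push_cast; ring
        rw [hcast] at hih
        exact hih

-- ===== VERDICT (by name: the statement is the Claim_ definition above) =====
theorem solution_spec : Claim_equal_solution := by
  intro cony brown _hD hP
  unfold Spec_solution solution solution_alt
  rcases hP with hb | hc
  · rw [bfs_eq_stateB]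
    have h := loop_eq_scan brown hb 100000 0 cony (by omega)
    simpa [stateA] using h
  · have e1 : (100000 : Nat) = 99999 + 1 := by norm_num
    rw [e1, solALoop_out 99999 cony 0 _ _ (by omega), solBScan_out 99999 _ cony 0 (by omega)]
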